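-- pv_equiv track=rewrite | github.com/ManuelNuniez/Collage_Programs | Python/Guia 3/Ejercicio 2.py | MatrizA
-- ===== SOURCE A (Python) =====
-- def MatrizA(filas,columnas):
--     """Creación de matriz tipo A: [[1 0 0 0]
--                                     [0 3 0 0]
--                                     [0 0 5 0]
--                                     [0 0 0 7]]"""
--
--     matriz=[]
--     acum=1
--     for f in range(filas):
--         matriz.append([])
--         for c in range(columnas):
--             if f==c: ##cuando el numero de fila y columna coincida le agrega el numero impar (en la diagonal)
--                 matriz[f].append(acum)
--                 acum+=2
--             else:
--                 matriz[f].append(0)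
--     return matriz
-- ===== SOURCE B (Python) =====
-- def MatrizA(filas, columnas):
--     matriz = [[0] * columnas for _ in range(filas)]
--     for i in range(min(filas, columnas)):
--         matriz[i][i] = 2 * i + 1
--     return matriz
-- ===== Notes on version B (the rewrite author's own statement) =====
-- stated objective: simpler
-- what changed: Replaces the nested per-cell branching loop with a running odd accumulator by a bulk zero-fill of the matrix plus a single one-dimensional diagonal pass using the closed form 2*i+1.
import Mathlib
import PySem

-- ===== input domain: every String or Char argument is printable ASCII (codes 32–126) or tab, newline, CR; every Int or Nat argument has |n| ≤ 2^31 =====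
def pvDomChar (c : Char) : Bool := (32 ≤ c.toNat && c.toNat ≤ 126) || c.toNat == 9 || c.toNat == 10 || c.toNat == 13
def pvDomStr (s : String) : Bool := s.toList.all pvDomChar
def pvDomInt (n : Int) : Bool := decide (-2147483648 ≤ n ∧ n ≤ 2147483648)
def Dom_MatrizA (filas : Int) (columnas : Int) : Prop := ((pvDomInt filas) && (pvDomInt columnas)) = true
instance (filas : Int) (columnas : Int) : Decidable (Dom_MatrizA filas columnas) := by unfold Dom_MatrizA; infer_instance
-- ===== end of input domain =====

-- B builds the zero matrix in bulk and sets the diagonal in one separate pass with the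
-- closed form 2*i+1, instead of A's nested per-cell branching with a running accumulator.

-- ===== PORT A =====
-- nested loops; state is (matriz, acum); the inner loop builds the row matriz[f] by appends
-- (matriz[f] is always the row appended at the start of iteration f)
def MatrizA (filas : Int) (columnas : Int) : List (List Int) :=
  (((PySem.List.pyRange 0 filas 1).foldl
    (fun (st : List (List Int) × Int) f =>
      let inner := (PySem.List.pyRange 0 columnas 1).foldl
        (fun (rc : List Int × Int) c =>
          if f = c then (rc.1 ++ [rc.2], rc.2 + 2) else (rc.1 ++ [0], rc.2))
        (([] : List Int), st.2)
      (st.1 ++ [inner.1], inner.2))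
    (([] : List (List Int)), (1 : Int)))).1

-- ===== PORT B =====
-- matriz = [[0]*columnas for _ in range(filas)]; then matriz[i][i] = 2*i+1
-- for i in range(min(filas, columnas)); the in-place assignment is List.set
def MatrizA_alt (filas : Int) (columnas : Int) : List (List Int) :=
  let matriz := (PySem.List.pyRange 0 filas 1).map (fun _ => List.replicate columnas.toNat (0 : Int))
  (PySem.List.pyRange 0 (min filas columnas) 1).foldl
    (fun m i => m.set i.toNat ((m.getD i.toNat []).set i.toNat (2 * i + 1)))
    matriz

-- ===== PRECONDITION & SPEC =====
def Spec_MatrizA (filas : Int) (columnas : Int) (out : List (List Int)) : Prop := out = MatrizA_alt filas columnas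
instance (filas : Int) (columnas : Int) (out : List (List Int)) : Decidable (Spec_MatrizA filas columnas out) := by unfold Spec_MatrizA; infer_instance

-- ===== CLAIM (what is proved, stated in full; the proofs are below) =====
def Claim_equal_MatrizA : Prop := ∀ (filas : Int) (columnas : Int), Dom_MatrizA filas columnas → Spec_MatrizA filas columnas (MatrizA filas columnas)

-- ===== LEMMAS AND PROOFS =====
-- both ports are reduced to the canonical matrix pvMat

lemma MatrizA_inner (f a : Int) (m : Nat) :
    (List.range m).foldl
      (fun (rc : List Int × Int) (c : Nat) =>
        if f = (c : Int) then (rc.1 ++ [rc.2], rc.2 + 2) else (rc.1 ++ [0], rc.2))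
      (([] : List Int), a)
    = ((List.range m).map (fun (c : Nat) => if f = (c : Int) then a else 0),
       a + if 0 ≤ f ∧ f < (m : Int) then 2 else 0) := by
  induction m with
  | zero => simp
  | succ k ih =>
    rw [List.range_succ, List.foldl_append, ih]
    by_cases h : f = (k : Int)
    · simp [h]
    · simp [h]
      omega

def pvRow (cols f : Nat) : List Int :=
  (List.range cols).map (fun c => if f = c then 2 * (f : Int) + 1 else 0)

def pvMat (n cols : Nat) : List (List Int) :=
  (List.range n).map (pvRow cols)

lemma MatrizA_outer (cols : Nat) (n : Nat) :
    (List.range n).foldl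
      (fun (st : List (List Int) × Int) (fn : Nat) =>
        let inner := (List.range cols).foldl
          (fun (rc : List Int × Int) (c : Nat) =>
            if (fn : Int) = (c : Int) then (rc.1 ++ [rc.2], rc.2 + 2) else (rc.1 ++ [0], rc.2))
          (([] : List Int), st.2)
        (st.1 ++ [inner.1], inner.2))
      (([] : List (List Int)), (1 : Int))
    = (pvMat n cols, 1 + 2 * (min n cols : Int)) := by
  induction n with
  | zero => simp [pvMat]
  | succ k ih =>
    rw [List.range_succ, List.foldl_append]
    simp only [List.foldl_cons, List.foldl_nil, ih]
    rw [MatrizA_inner]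
    simp only [Prod.mk.injEq]
    constructor
    · have hrow : (List.map (fun (c : Nat) => if (k : Int) = (c : Int) then 1 + 2 * min (k : Int) (cols : Int) else 0) (List.range cols)) = pvRow cols k := by
        simp only [pvRow]
        refine List.map_congr_left (fun c hc => ?_)
        by_cases hkc : k = c
        · have hc2 : (c : Int) < (cols : Int) := by exact_mod_cast List.mem_range.mp hc
          simp [hkc]
          omega
        · have h2 : ¬ ((k : Int) = (c : Int)) := by exact_mod_cast hkc
          simp [hkc, h2]
      rw [hrow]
      simp [pvMat, List.range_succ]
    · by_cases h : k < cols
      · have h1 : 0 ≤ (k : Int) ∧ (k : Int) < (cols : Int) :=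
          ⟨by positivity, by exact_mod_cast h⟩
        simp only [if_pos h1]
        push_cast
        omega
      · have h1 : ¬ (0 ≤ (k : Int) ∧ (k : Int) < (cols : Int)) := by
          push Not
          intro _
          exact_mod_cast Nat.not_lt.mp h
        simp only [if_neg h1]
        push_cast
        omega

lemma MatrizA_eq_pvMat (filas columnas : Int) :
    MatrizA filas columnas = pvMat filas.toNat columnas.toNat := by
  unfold MatrizA
  simp only [PySem.List.pyRange_one, Int.sub_zero, zero_add, List.foldl_map]
  rw [MatrizA_outer]

lemma set_map_range {α : Type} (n k : Nat) (g : Nat → α) (x : α) :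
    ((List.range n).map g).set k x
      = (List.range n).map (fun f => if f = k then x else g f) := by
  apply List.ext_getElem
  · simp
  · intro i h1 h2
    simp only [List.getElem_set, List.getElem_map, List.getElem_range]
    by_cases hik : k = i
    · simp [hik]
    · have hik2 : ¬ (i = k) := fun e => hik e.symm
      simp [hik, hik2]

lemma MatrizA_alt_fold (n cols : Nat) (k : Nat) (hk1 : k ≤ n) (hk2 : k ≤ cols) :
    (List.range k).foldl
      (fun (m : List (List Int)) (i : Nat) =>
        m.set i ((m.getD i []).set i (2 * (i : Int) + 1)))
      ((List.range n).map (fun _ => List.replicate cols (0 : Int)))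
    = (List.range n).map
        (fun f => if f < k then (List.replicate cols (0 : Int)).set f (2 * (f : Int) + 1)
                  else List.replicate cols (0 : Int)) := by
  induction k with
  | zero => simp
  | succ j ih =>
    rw [List.range_succ, List.foldl_append]
    rw [ih (by omega) (by omega)]
    simp only [List.foldl_cons, List.foldl_nil]
    have hj : j < n := by omega
    have hget : (((List.range n).map
        (fun f => if f < j then (List.replicate cols (0 : Int)).set f (2 * (f : Int) + 1)
                  else List.replicate cols (0 : Int))).getD j [])
        = List.replicate cols (0 : Int) := by
      rw [List.getD_eq_getElem?_getD, List.getElem?_map]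
      simp [hj]
    rw [hget, set_map_range]
    refine List.map_congr_left (fun f hf => ?_)
    by_cases h : f = j
    · simp [h]
    · by_cases h2 : f < j
      · have h3 : f < j + 1 := by omega
        simp [h, h2, h3]
      · have h3 : ¬ (f < j + 1) := by omega
        simp [h, h2, h3]

lemma zero_set_eq_pvRow (cols f : Nat) :
    (List.replicate cols (0 : Int)).set f (2 * (f : Int) + 1) = pvRow cols f := by
  apply List.ext_getElem
  · simp [pvRow]
  · intro i h1 h2
    simp only [List.getElem_set, List.getElem_replicate, pvRow, List.getElem_map,
      List.getElem_range]

lemma replicate_eq_pvRow (cols f : Nat) (hf : cols ≤ f) :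
    List.replicate cols (0 : Int) = pvRow cols f := by
  apply List.ext_getElem
  · simp [pvRow]
  · intro i h1 h2
    simp only [List.getElem_replicate, pvRow, List.getElem_map, List.getElem_range]
    have : f ≠ i := by simp at h1; omega
    simp [this]

lemma MatrizA_alt_eq_pvMat (filas columnas : Int) :
    MatrizA_alt filas columnas = pvMat filas.toNat columnas.toNat := by
  unfold MatrizA_alt
  simp only [PySem.List.pyRange_one, Int.sub_zero, zero_add, List.foldl_map, List.map_map,
    Function.comp_def, Int.toNat_natCast]
  rw [MatrizA_alt_fold filas.toNat columnas.toNat (min filas columnas).toNat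
    (by omega) (by omega)]
  unfold pvMat
  refine List.map_congr_left (fun f hf => ?_)
  by_cases h : f < (min filas columnas).toNat
  · rw [if_pos h, zero_set_eq_pvRow]
  · have hfn : f < filas.toNat := List.mem_range.mp hf
    rw [if_neg h]
    exact replicate_eq_pvRow columnas.toNat f (by omega)

-- ===== VERDICT (by name: the statement is the Claim_ definition above) =====
theorem MatrizA_spec : Claim_equal_MatrizA := by
  intro filas columnas _
  unfold Spec_MatrizA
  rw [MatrizA_eq_pvMat, MatrizA_alt_eq_pvMat]
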